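-- pv_equiv track=rewrite | github.com/womanium-quantum/Quantum-Hardware-Education-Challenge---QWorld | C_Topological_Quantum_Gates/braiding_generators/fib_qudit.py | find_basis
-- ===== SOURCE A (Python) =====
-- from typing import List
-- from copy import deepcopy
--
-- def check_rule(anyon_1, anyon_2, outcome):
--     """
--     anyons can be either 0 or 1.
--     """
--     check = False
--     if anyon_1 == 1 and anyon_2 == 1:
--         check = True
--
--     elif anyon_1 == 1 or anyon_2 == 1:
--         if outcome == 1:
--             check = True
--     else:
--         if outcome == 0:
--             check = True
--
--     return check
--
-- def check_state(outcomes: List):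
--     """
--     checks if a state is valid in Fibonacci models. Ex:
--
--         1 1 1 1 1
--         \/ / / /
--         i\/ / /
--          j\/ /
--           k\/
--            l\
--         outcomes of the state |((((1, 1)_i, 1)_j, 1)_k, 1)_l| are [i, j, k, l]
--     Inputs:
--         outcomes: list:
--             outcomes of the fusion tree by order (L to R)
--     """
--     check = True
--     previous_outcome = 1
--     for outcome in outcomes:
--         if check_rule(previous_outcome, 1, outcome):
--             previous_outcome = outcome
--         else:
--             check = False
--             break
--
--     return check
--
-- def find_basis(n_anyons):
--     """
--     generates all states that form the basis of Hilbert space of n_anyons.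
--     Inputs:
--         n_anyons: in:
--             number of anyons.
--     Returns:
--         List[List]: list of states with their labeling outcomes.
--     """
--     n_labels = n_anyons - 1
--
--     # Generate all combinations and check if
--     # they verify Fibonacci rules
--     # (To do) combinations can be generated with binary methods.
--
--     init_comb = [0] * n_labels
--     final_comb = [1] * n_labels
--     new_comb = init_comb
--     states = []
--     if check_state(new_comb):
--         new_state = deepcopy(new_comb)
--         states.append(new_state)
--
--     while not new_comb == final_comb:
--         for i, label in enumerate(new_comb):
--             if label == 0:
--                 new_comb[i] = 1
--                 break
--             else:
--                 new_comb[i] = 0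
--         if check_state(new_comb):
--             new_state = deepcopy(new_comb)
--             states.append(new_state)
--
--     return states
-- ===== SOURCE B (Python) =====
-- def find_basis(n_anyons):
--     """Directly build the valid states (no two consecutive 0s, counting order)
--     by a DP over the label index, instead of filtering all 2^n combinations."""
--     n_labels = n_anyons - 1
--     if n_labels <= 0:
--         return [[]]
--     all_valid = [[]]       # valid states of current length, counting order
--     end_one = [[]]         # those that may be followed by a 0
--     for _ in range(n_labels):
--         all_valid, end_one = (
--             [s + [0] for s in end_one] + [s + [1] for s in all_valid],
--             [s + [1] for s in all_valid],
--         )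
--     return all_valid
-- ===== Notes on version B (the rewrite author's own statement) =====
-- stated objective: faster
-- what changed: B builds the valid states (no two consecutive zeros) directly by a DP over the label index in the same counting order, instead of enumerating every bit combination with a binary counter and filtering.
import Mathlib
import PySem

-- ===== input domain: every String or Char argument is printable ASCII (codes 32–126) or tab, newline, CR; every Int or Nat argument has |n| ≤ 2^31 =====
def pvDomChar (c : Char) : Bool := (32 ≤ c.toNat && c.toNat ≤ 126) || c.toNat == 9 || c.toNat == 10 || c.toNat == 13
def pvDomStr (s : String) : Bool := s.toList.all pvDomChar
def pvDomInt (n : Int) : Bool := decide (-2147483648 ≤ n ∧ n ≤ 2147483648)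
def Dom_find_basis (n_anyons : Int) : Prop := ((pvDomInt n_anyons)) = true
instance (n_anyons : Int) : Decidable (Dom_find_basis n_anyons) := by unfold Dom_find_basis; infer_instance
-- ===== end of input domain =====

-- B replaces A's enumerate-all-combinations-and-filter with a DP that builds
-- only the valid states directly, in the same counting order (objective: faster).

-- ===== PORT A =====
def check_rule (anyon_1 anyon_2 outcome : Int) : Bool :=
  if anyon_1 == 1 && anyon_2 == 1 then true
  else if anyon_1 == 1 || anyon_2 == 1 then
    (if outcome == 1 then true else false)
  else
    (if outcome == 0 then true else false)

def check_state_aux : Int → List Int → Bool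
  | _, [] => true
  | prev, o :: rest => if check_rule prev 1 o then check_state_aux o rest else false

def check_state (outcomes : List Int) : Bool := check_state_aux 1 outcomes

-- the for-loop body of A's while loop: flip bits from index 0 until the first 0 is set to 1
def incr : List Int → List Int
  | [] => []
  | l :: rest => if l == 0 then (1 : Int) :: rest else (0 : Int) :: incr rest

-- A's while loop; the fuel argument only makes the recursion total
-- (2 ^ length always suffices, the loop code is unchanged)
def loopA : Nat → List Int → List Int → List (List Int) → List (List Int)
  | fuel, comb, final, states =>
    if comb == final then states
    else match fuel with
      | 0 => states
      | f + 1 =>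
        let c := incr comb
        loopA f c final (if check_state c then states ++ [c] else states)

def find_basis (n_anyons : Int) : List (List Int) :=
  let n_labels := n_anyons - 1
  let init_comb := List.replicate n_labels.toNat (0 : Int)
  let final_comb := List.replicate n_labels.toNat (1 : Int)
  let states := if check_state init_comb then [init_comb] else []
  loopA (2 ^ init_comb.length) init_comb final_comb states

-- ===== PORT B =====
def find_basis_alt (n_anyons : Int) : List (List Int) :=
  let n_labels := n_anyons - 1
  if n_labels ≤ 0 then [[]]
  else
    let p := (List.range n_labels.toNat).foldl
      (fun (ae : List (List Int) × List (List Int)) _ =>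
        (ae.2.map (fun s => s ++ [0]) ++ ae.1.map (fun s => s ++ [1]),
         ae.1.map (fun s => s ++ [1])))
      ([[]], [[]])
    p.1

-- ===== PRECONDITION & SPEC =====
def Spec_find_basis (n_anyons : Int) (out : List (List Int)) : Prop := out = find_basis_alt n_anyons
instance (n_anyons : Int) (out : List (List Int)) : Decidable (Spec_find_basis n_anyons out) := by unfold Spec_find_basis; infer_instance

-- ===== CLAIM (what is proved, stated in full; the proofs are below) =====
def Claim_equal_find_basis : Prop := ∀ (n_anyons : Int), Dom_find_basis n_anyons → Spec_find_basis n_anyons (find_basis n_anyons)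

-- ===== LEMMAS AND PROOFS =====

-- little-endian bits of i, width k (the combination visited at step i of A's counter)
def bits : Nat → Nat → List Int
  | 0, _ => []
  | k + 1, i => ((i % 2 : Nat) : Int) :: bits k (i / 2)

def allC (k : Nat) : List (List Int) := (List.range (2 ^ k)).map (bits k)

-- "may be followed by a 0": valid and last label (default 1) is 1
def okE (s : List Int) : Bool := check_state s && (s.getLastD 1 == 1)

theorem bits_zero (k : Nat) : bits k 0 = List.replicate k 0 := by
  induction k with
  | zero => rfl
  | succ k ih => simp [bits, List.replicate_succ, ih]

theorem bits_ones_iff (k i : Nat) (h : i < 2 ^ k) :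
    bits k i = List.replicate k 1 ↔ i = 2 ^ k - 1 := by
  induction k generalizing i with
  | zero => simp [bits]; omega
  | succ k ih =>
    have h2 : i / 2 < 2 ^ k := by
      have : (2:Nat) ^ (k+1) = 2 ^ k * 2 := by ring
      omega
    simp [bits, List.replicate_succ, ih _ h2]
    constructor
    · rintro ⟨h1, h3⟩
      have : i % 2 = 1 := by omega
      have : (2:Nat) ^ (k+1) = 2 ^ k * 2 := by ring
      omega
    · intro h1
      have hp : (2:Nat) ^ (k+1) = 2 ^ k * 2 := by ring
      have h1pos : 1 ≤ 2 ^ k := Nat.one_le_two_pow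
      constructor
      · omega
      · omega

theorem incr_bits (k i : Nat) (h : i + 1 < 2 ^ k) :
    incr (bits k i) = bits k (i + 1) := by
  induction k generalizing i with
  | zero => simp at h
  | succ k ih =>
    by_cases he : i % 2 = 0
    · simp [bits, incr, he]
      constructor
      · omega
      · congr 1; omega
    · have he1 : i % 2 = 1 := by omega
      have h2 : i / 2 + 1 < 2 ^ k := by
        have : (2:Nat) ^ (k+1) = 2 ^ k * 2 := by ring
        omega
      simp [bits, incr, he1, ih _ h2]
      constructor
      · omega
      · congr 1; omega

theorem loopA_eq (k : Nat) : ∀ (f i : Nat) (st : List (List Int)),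
    i < 2 ^ k → 2 ^ k - 1 - i ≤ f →
    loopA f (bits k i) (List.replicate k 1) st
      = st ++ ((List.range' (i + 1) (2 ^ k - 1 - i)).map (bits k)).filter check_state := by
  intro f
  induction f with
  | zero =>
    intro i st hi hf
    have : i = 2 ^ k - 1 := by omega
    subst this
    rw [loopA]
    simp [(bits_ones_iff k _ hi).mpr rfl]
  | succ f ih =>
    intro i st hi hf
    rw [loopA]
    by_cases hone : i = 2 ^ k - 1
    · subst hone
      simp [(bits_ones_iff k _ hi).mpr rfl]
    · have hne : ¬ (bits k i = List.replicate k 1) := by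
        rw [bits_ones_iff k i hi]; exact hone
      simp only [beq_iff_eq, hne, if_false]
      have hlt : i + 1 < 2 ^ k := by omega
      rw [incr_bits k i hlt, ih (i + 1) _ hlt (by omega)]
      have hc : 2 ^ k - 1 - i = (2 ^ k - 1 - (i + 1)) + 1 := by omega
      rw [hc, List.range'_succ]
      simp only [List.map_cons, List.filter_cons]
      by_cases hcs : check_state (bits k (i + 1))
      · simp [hcs]
      · simp [hcs]

theorem check_rule_one (x b : Int) : check_rule x 1 b = (x == 1 || b == 1) := by
  by_cases hx : x = 1 <;> by_cases hb : b = 1 <;> simp [check_rule, hx, hb]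

theorem getLastD_cons' (o p : Int) (rest : List Int) :
    (o :: rest).getLastD p = rest.getLastD o := by
  cases rest with
  | nil => simp
  | cons h t =>
    cases ho : (h :: t).getLast? with
    | none => simp at ho
    | some x => simp [List.getLastD]

theorem check_aux_concat (s : List Int) : ∀ (p b : Int),
    check_state_aux p (s ++ [b]) =
      (check_state_aux p s && check_rule (s.getLastD p) 1 b) := by
  induction s with
  | nil => intro p b; simp [check_state_aux]
  | cons o rest ih =>
    intro p b
    simp only [List.cons_append, check_state_aux]
    by_cases h : check_rule p 1 o = true
    · simp only [h, if_true, ih o b, getLastD_cons']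
    · simp [h]

theorem check_state_concat_one (s : List Int) :
    check_state (s ++ [1]) = check_state s := by
  simp [check_state, check_aux_concat, check_rule_one]

theorem check_state_concat_zero (s : List Int) :
    check_state (s ++ [0]) = okE s := by
  simp [check_state, okE, check_aux_concat, check_rule_one]

theorem okE_concat_one (s : List Int) : okE (s ++ [1]) = check_state s := by
  simp [okE, check_state_concat_one]

theorem okE_concat_zero (s : List Int) : okE (s ++ [0]) = false := by
  simp [okE]

theorem bits_split (k : Nat) : ∀ i : Nat, i < 2 ^ (k + 1) →
    bits (k + 1) i = bits k (i % 2 ^ k) ++ [((i / 2 ^ k : Nat) : Int)] := by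
  induction k with
  | zero =>
    intro i hi
    interval_cases i <;> rfl
  | succ k ih =>
    intro i hi
    have h2 : i / 2 < 2 ^ (k + 1) := by
      have : (2:Nat) ^ (k+2) = 2 ^ (k+1) * 2 := by ring
      omega
    show ((i % 2 : Nat) : Int) :: bits (k + 1) (i / 2) = _
    rw [ih _ h2]
    have e1 : i / 2 % 2 ^ k = i % 2 ^ (k + 1) / 2 := by
      have h1 : (2:Nat) ^ (k + 1) = 2 * 2 ^ k := by ring
      rw [h1, Nat.mod_mul_right_div_self i 2 (2 ^ k)]
    have e2 : i / 2 / 2 ^ k = i / 2 ^ (k + 1) := by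
      rw [Nat.div_div_eq_div_mul, Nat.pow_succ, Nat.mul_comm]
    have e3 : (i % 2 : Nat) = i % 2 ^ (k + 1) % 2 := by
      rw [Nat.mod_mod_of_dvd _ (dvd_pow_self 2 (Nat.succ_ne_zero k))]
    rw [e1, e2, e3]
    rfl

theorem allC_succ (k : Nat) :
    allC (k + 1) = (allC k).map (fun s => s ++ [0]) ++ (allC k).map (fun s => s ++ [1]) := by
  unfold allC
  have hsum : (2:Nat) ^ (k + 1) = 2 ^ k + 2 ^ k := by ring
  rw [hsum, List.range_add]
  simp only [List.map_append, List.map_map]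
  congr 1
  · apply List.map_congr_left
    intro i hi
    simp only [List.mem_range] at hi
    have := bits_split k i (by omega)
    simp only [Function.comp_apply]
    rw [this, Nat.mod_eq_of_lt hi, Nat.div_eq_of_lt hi]
    rfl
  · apply List.map_congr_left
    intro i hi
    simp only [List.mem_range] at hi
    have hlt : 2 ^ k + i < 2 ^ (k + 1) := by omega
    have := bits_split k (2 ^ k + i) hlt
    simp only [Function.comp_apply]
    rw [this]
    have hpos : 0 < 2 ^ k := Nat.pow_pos (by norm_num)
    have e1 : (2 ^ k + i) % 2 ^ k = i := by
      rw [Nat.add_mod_left, Nat.mod_eq_of_lt hi]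
    have e2 : (2 ^ k + i) / 2 ^ k = 1 := by
      rw [Nat.add_comm, Nat.add_div_right _ hpos, Nat.div_eq_of_lt hi]
    rw [e1, e2]
    rfl

theorem filter_check_succ (k : Nat) :
    (allC (k + 1)).filter check_state =
      ((allC k).filter okE).map (fun s => s ++ [0])
        ++ ((allC k).filter check_state).map (fun s => s ++ [1]) := by
  rw [allC_succ, List.filter_append, List.filter_map, List.filter_map]
  congr 2
  · apply List.filter_congr
    intro s _
    simp [Function.comp, check_state_concat_zero]
  · apply List.filter_congr
    intro s _
    simp [Function.comp, check_state_concat_one]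

theorem filter_okE_succ (k : Nat) :
    (allC (k + 1)).filter okE = ((allC k).filter check_state).map (fun s => s ++ [1]) := by
  rw [allC_succ, List.filter_append, List.filter_map, List.filter_map]
  have h0 : (allC k).filter (okE ∘ fun s => s ++ [0]) = [] := by
    apply List.filter_eq_nil_iff.mpr
    intro s _
    simp [Function.comp, okE_concat_zero]
  rw [h0]
  simp only [List.map_nil, List.nil_append]
  congr 1
  apply List.filter_congr
  intro s _
  simp [Function.comp, okE_concat_one]

theorem fold_invariant (m : Nat) :
    (List.range m).foldl
      (fun (ae : List (List Int) × List (List Int)) _ =>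
        (ae.2.map (fun s => s ++ [0]) ++ ae.1.map (fun s => s ++ [1]),
         ae.1.map (fun s => s ++ [1])))
      ([[]], [[]])
      = ((allC m).filter check_state, (allC m).filter okE) := by
  induction m with
  | zero => rfl
  | succ m ih =>
    rw [List.range_succ, List.foldl_append, ih]
    simp only [List.foldl_cons, List.foldl_nil]
    rw [filter_check_succ, filter_okE_succ]

theorem find_basis_eq_filter (n : Int) :
    find_basis n = (allC ((n - 1).toNat)).filter check_state := by
  have hA : find_basis n
      = loopA (2 ^ ((n - 1).toNat)) (bits ((n - 1).toNat) 0)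
          (List.replicate ((n - 1).toNat) 1)
          (if check_state (bits ((n - 1).toNat) 0) then [bits ((n - 1).toNat) 0] else []) := by
    simp [find_basis, bits_zero]
  rw [hA]
  set k := (n - 1).toNat with hk
  have h0 : 0 < 2 ^ k := Nat.pow_pos (by norm_num)
  rw [loopA_eq k (2 ^ k) 0 _ h0 (by omega)]
  have hr : List.range (2 ^ k) = 0 :: List.range' 1 (2 ^ k - 1) := by
    rw [List.range_eq_range']
    have : 2 ^ k = (2 ^ k - 1) + 1 := by omega
    rw [this, List.range'_succ]
    simp
  unfold allC
  rw [hr]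
  simp only [List.map_cons, List.filter_cons, Nat.sub_zero]
  by_cases hcs : check_state (bits k 0)
  · simp [hcs]
  · simp [hcs]

-- ===== VERDICT (by name: the statement is the Claim_ definition above) =====
theorem find_basis_spec : Claim_equal_find_basis := by
  intro n _
  unfold Spec_find_basis
  rw [find_basis_eq_filter]
  unfold find_basis_alt
  by_cases h : n - 1 ≤ 0
  · have : (n - 1).toNat = 0 := Int.toNat_of_nonpos h
    simp [h, this, allC, bits, check_state, check_state_aux]
  · simp only [h, if_false]
    rw [fold_invariant]
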